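-- pv_equiv track=rewrite | github.com/michael-ar111/AtCoder-Problems-ABC-Python | arc/arc096/arc096a/arc096a.py | solve
-- ===== SOURCE A (Python) =====
-- def solve(A,B,C,X,Y):
--     min_cost = float('inf') # 最小コストの初期値を無限大を設定
--
--     #XYの2倍+1でABピザ分全探索
--     for ab in range(max(X,Y) * 2 + 1):
--         # ABピザをabマイ買った場合残すと計算
--         cost = C * ab
--
--         # 残りのAピザとBピザの必要枚数を計算。マイナスにならないため0
--         remain_a =max(0, X - ab//2)
--         remain_b =max(0, Y - ab//2)
--
--         # 残りの数のAコスト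
--         cost += A*remain_a
--         # 残りの数のBコスト
--         cost += B*remain_b
--
--         # 残りの数のAB,A,Bのコストで一番少ない数を格納
--         min_cost = min(min_cost, cost)
--
--     return min_cost
-- ===== SOURCE B (Python) =====
-- def solve(A, B, C, X, Y):
--     # O(1): the cost as a function of the AB-pizza count is piecewise linear,
--     # so the minimum over ab in [0, 2*max(X,Y)] is attained at a breakpoint.
--     M = max(X, Y)
--     p = max(X, 0)
--     q = max(Y, 0)
--
--     def g(k):  # cost when buying 2*k AB pizzas
--         return 2 * C * k + A * max(0, X - k) + B * max(0, Y - k)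
--
--     best = min(g(0), g(p), g(q), g(M))
--     if M >= 1:  # odd counts 2*k+1 exist only when the range reaches 1
--         best = min(best, C + min(g(0), g(min(p, M - 1)), g(min(q, M - 1)), g(M - 1)))
--     return best
-- ===== Notes on version B (the rewrite author's own statement) =====
-- stated objective: faster
-- what changed: Replaces the full scan over all AB-pizza counts by an O(1) evaluation of the piecewise-linear cost at its breakpoints (0, clamped X, clamped Y, max(X,Y), and their odd neighbours).
-- outside the precondition, e.g. on solve(1, 1, 1, -1, -2): A returns inf, B returns -2
import Mathlib
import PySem

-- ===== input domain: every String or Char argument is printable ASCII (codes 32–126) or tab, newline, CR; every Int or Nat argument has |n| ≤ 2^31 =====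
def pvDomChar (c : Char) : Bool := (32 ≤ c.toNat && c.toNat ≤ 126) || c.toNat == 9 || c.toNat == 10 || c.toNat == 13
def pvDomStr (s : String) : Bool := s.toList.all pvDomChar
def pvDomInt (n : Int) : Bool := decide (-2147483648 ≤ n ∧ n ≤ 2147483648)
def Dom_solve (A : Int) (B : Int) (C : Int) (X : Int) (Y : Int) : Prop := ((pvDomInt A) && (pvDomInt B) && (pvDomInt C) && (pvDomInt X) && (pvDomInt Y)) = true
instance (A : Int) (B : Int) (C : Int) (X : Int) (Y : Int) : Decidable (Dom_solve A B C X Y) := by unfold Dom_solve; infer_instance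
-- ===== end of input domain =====

-- B changes the algorithm: instead of scanning every AB-pizza count, it evaluates the
-- piecewise-linear cost only at its breakpoints (O(1) instead of O(max(X,Y))).

-- ===== PORT A =====
-- 'min_cost = float(inf)' is modelled as 'none'; the loop makes it 'some' on its first
-- iteration. The '.getD 0' default is unreachable under Pre_solve (nonempty range).
def solve (A : Int) (B : Int) (C : Int) (X : Int) (Y : Int) : Int :=
  ((PySem.List.pyRange 0 (max X Y * 2 + 1) 1).foldl
    (fun min_cost ab =>
      let cost := C * ab
      let remain_a := max 0 (X - PySem.Int.floordiv ab 2)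
      let remain_b := max 0 (Y - PySem.Int.floordiv ab 2)
      let cost := cost + A * remain_a
      let cost := cost + B * remain_b
      some (match min_cost with
            | none => cost
            | some m => min m cost))
    (none : Option Int)).getD 0

-- ===== PORT B =====
-- gB k = cost when buying 2*k AB pizzas (the nested 'def g' of Source B)
def gB (A : Int) (B : Int) (C : Int) (X : Int) (Y : Int) (k : Int) : Int :=
  2 * C * k + A * max 0 (X - k) + B * max 0 (Y - k)

def solve_alt (A : Int) (B : Int) (C : Int) (X : Int) (Y : Int) : Int :=
  let M := max X Y
  let p := max X 0
  let q := max Y 0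
  let best := min (min (min (gB A B C X Y 0) (gB A B C X Y p)) (gB A B C X Y q)) (gB A B C X Y M)
  if 1 ≤ M then
    min best (C + min (min (min (gB A B C X Y 0) (gB A B C X Y (min p (M - 1)))) (gB A B C X Y (min q (M - 1)))) (gB A B C X Y (M - 1)))
  else best

-- ===== PRECONDITION & SPEC =====
-- Pre_solve excludes max(X,Y) < 0, where A's loop body never runs and A returns
-- float('inf') — a float, not a value of the declared int result type.
def Pre_solve (A : Int) (B : Int) (C : Int) (X : Int) (Y : Int) : Prop := 0 ≤ max X Y
instance (A : Int) (B : Int) (C : Int) (X : Int) (Y : Int) : Decidable (Pre_solve A B C X Y) := by unfold Pre_solve; infer_instance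
def pvWitness_solve : Int × Int × Int × Int × Int := (3, 5, 4, 2, 6)

def Spec_solve (A : Int) (B : Int) (C : Int) (X : Int) (Y : Int) (out : Int) : Prop := out = solve_alt A B C X Y
instance (A : Int) (B : Int) (C : Int) (X : Int) (Y : Int) (out : Int) : Decidable (Spec_solve A B C X Y out) := by unfold Spec_solve; infer_instance

-- ===== CLAIM (what is proved, stated in full; the proofs are below) =====
def Claim_equal_solve : Prop := ∀ (A : Int) (B : Int) (C : Int) (X : Int) (Y : Int), Dom_solve A B C X Y → Pre_solve A B C X Y → Spec_solve A B C X Y (solve A B C X Y)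

-- ===== LEMMAS AND PROOFS =====

-- A's per-count cost, as the loop body computes it
def fA (A : Int) (B : Int) (C : Int) (X : Int) (Y : Int) (ab : Int) : Int :=
  C * ab + A * max 0 (X - PySem.Int.floordiv ab 2) + B * max 0 (Y - PySem.Int.floordiv ab 2)

-- the Option-valued running minimum equals a plain Int fold once it is 'some'
theorem foldl_opt (f : Int → Int) : ∀ (xs : List Int) (c : Int),
    xs.foldl (fun acc ab => some (match acc with | none => f ab | some m => min m (f ab))) (some c)
      = some (xs.foldl (fun m ab => min m (f ab)) c) := by
  intro xs
  induction xs with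
  | nil => intro c; rfl
  | cons x t ih => intro c; simpa using ih (min c (f x))

theorem floordiv_two_mul (k : Int) : PySem.Int.floordiv (2 * k) 2 = k := by
  rw [PySem.Int.floordiv_eq_iff_of_pos (by omega)]; omega

theorem floordiv_two_mul_add_one (k : Int) : PySem.Int.floordiv (2 * k + 1) 2 = k := by
  rw [PySem.Int.floordiv_eq_iff_of_pos (by omega)]; omega

theorem fA_even (A B C X Y k : Int) : fA A B C X Y (2 * k) = gB A B C X Y k := by
  simp only [fA, gB, floordiv_two_mul]; ring

theorem fA_odd (A B C X Y k : Int) : fA A B C X Y (2 * k + 1) = C + gB A B C X Y k := by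
  simp only [fA, gB, floordiv_two_mul_add_one]; ring

-- a linear function on an interval is bounded below by its value at an endpoint
theorem lin_min (s c lo hi k : Int) (h1 : lo ≤ k) (h2 : k ≤ hi) :
    min (s * lo + c) (s * hi + c) ≤ s * k + c := by
  rcases le_total 0 s with hs | hs
  · exact le_trans (min_le_left _ _) (by nlinarith)
  · exact le_trans (min_le_right _ _) (by nlinarith)

-- key piecewise-linearity fact: on [0, N], gB is minimised at one of the breakpoints
theorem g_lb (A B C X Y N k : Int) (hk0 : 0 ≤ k) (hkN : k ≤ N) :
    min (min (min (gB A B C X Y 0) (gB A B C X Y (min (max X 0) N))) (gB A B C X Y (min (max Y 0) N))) (gB A B C X Y N) ≤ gB A B C X Y k := by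
  set p' := min (max X 0) N with hp'
  set q' := min (max Y 0) N with hq'
  have hg : ∀ t, gB A B C X Y t = 2 * C * t + A * max 0 (X - t) + B * max 0 (Y - t) := fun t => rfl
  by_cases hX : k ≤ X <;> by_cases hY : k ≤ Y
  · -- k ≤ X, k ≤ Y : slope 2C - A - B on [0, min p' q']
    have hek : k ≤ min p' q' := by omega
    have l1 : gB A B C X Y k = (2*C - A - B) * k + (A*X + B*Y) := by
      rw [hg]; have h1 : max 0 (X - k) = X - k := by omega
      have h2 : max 0 (Y - k) = Y - k := by omega
      rw [h1, h2]; ring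
    have l2 : gB A B C X Y 0 = (2*C - A - B) * 0 + (A*X + B*Y) := by
      rw [hg]; have h1 : max 0 (X - 0) = X := by omega
      have h2 : max 0 (Y - 0) = Y := by omega
      rw [h1, h2]; ring
    have l3 : gB A B C X Y (min p' q') = (2*C - A - B) * (min p' q') + (A*X + B*Y) := by
      rw [hg]; have h1 : max 0 (X - min p' q') = X - min p' q' := by omega
      have h2 : max 0 (Y - min p' q') = Y - min p' q' := by omega
      rw [h1, h2]; ring
    have := lin_min (2*C - A - B) (A*X + B*Y) 0 (min p' q') k hk0 hek
    rw [← l2, ← l3, l1] at *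
    rcases min_cases p' q' with ⟨hmin, _⟩ | ⟨hmin, _⟩ <;> rw [hmin] at this <;> omega
  · -- Y < k ≤ X : slope 2C - A on [q', p']
    have hlo : q' ≤ k := by omega
    have hhi : k ≤ p' := by omega
    have l1 : gB A B C X Y k = (2*C - A) * k + A*X := by
      rw [hg]; have h1 : max 0 (X - k) = X - k := by omega
      have h2 : max 0 (Y - k) = 0 := by omega
      rw [h1, h2]; ring
    have l2 : gB A B C X Y q' = (2*C - A) * q' + A*X := by
      rw [hg]; have h1 : max 0 (X - q') = X - q' := by omega
      have h2 : max 0 (Y - q') = 0 := by omega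
      rw [h1, h2]; ring
    have l3 : gB A B C X Y p' = (2*C - A) * p' + A*X := by
      rw [hg]; have h1 : max 0 (X - p') = X - p' := by omega
      have h2 : max 0 (Y - p') = 0 := by omega
      rw [h1, h2]; ring
    have := lin_min (2*C - A) (A*X) q' p' k hlo hhi
    rw [← l2, ← l3, l1] at *
    omega
  · -- X < k ≤ Y : slope 2C - B on [p', q']
    have hlo : p' ≤ k := by omega
    have hhi : k ≤ q' := by omega
    have l1 : gB A B C X Y k = (2*C - B) * k + B*Y := by
      rw [hg]; have h1 : max 0 (X - k) = 0 := by omega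
      have h2 : max 0 (Y - k) = Y - k := by omega
      rw [h1, h2]; ring
    have l2 : gB A B C X Y p' = (2*C - B) * p' + B*Y := by
      rw [hg]; have h1 : max 0 (X - p') = 0 := by omega
      have h2 : max 0 (Y - p') = Y - p' := by omega
      rw [h1, h2]; ring
    have l3 : gB A B C X Y q' = (2*C - B) * q' + B*Y := by
      rw [hg]; have h1 : max 0 (X - q') = 0 := by omega
      have h2 : max 0 (Y - q') = Y - q' := by omega
      rw [h1, h2]; ring
    have := lin_min (2*C - B) (B*Y) p' q' k hlo hhi
    rw [← l2, ← l3, l1] at *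
    omega
  · -- X < k, Y < k : slope 2C on [max p' q', N]
    have hlo : max p' q' ≤ k := by omega
    have l1 : gB A B C X Y k = (2*C) * k + 0 := by
      rw [hg]; have h1 : max 0 (X - k) = 0 := by omega
      have h2 : max 0 (Y - k) = 0 := by omega
      rw [h1, h2]; ring
    have l2 : gB A B C X Y (max p' q') = (2*C) * (max p' q') + 0 := by
      rw [hg]; have h1 : max 0 (X - max p' q') = 0 := by omega
      have h2 : max 0 (Y - max p' q') = 0 := by omega
      rw [h1, h2]; ring
    have l3 : gB A B C X Y N = (2*C) * N + 0 := by
      rw [hg]; have h1 : max 0 (X - N) = 0 := by omega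
      have h2 : max 0 (Y - N) = 0 := by omega
      rw [h1, h2]; ring
    have := lin_min (2*C) 0 (max p' q') N k hlo hkN
    rw [← l2, ← l3, l1] at *
    rcases max_cases p' q' with ⟨hmax, _⟩ | ⟨hmax, _⟩ <;> rw [hmax] at this <;> omega

-- A's result as a plain minimum fold over the nonempty range
theorem solve_eq_fold (A B C X Y : Int) (h : 0 ≤ max X Y) :
    solve A B C X Y
      = ((PySem.List.pyRange 1 (max X Y * 2 + 1) 1).map (fA A B C X Y)).foldl min (fA A B C X Y 0) := by
  have hcons : PySem.List.pyRange 0 (max X Y * 2 + 1) 1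
      = 0 :: PySem.List.pyRange 1 (max X Y * 2 + 1) 1 := by
    exact PySem.List.pyRange_one_cons (by omega)
  simp only [solve, hcons, List.foldl_cons, List.foldl_map, fA]
  have h2 := foldl_opt (fun ab => C * ab + A * max 0 (X - PySem.Int.floordiv ab 2) + B * max 0 (Y - PySem.Int.floordiv ab 2)) (PySem.List.pyRange 1 (max X Y * 2 + 1) 1) (C * 0 + A * max 0 (X - PySem.Int.floordiv 0 2) + B * max 0 (Y - PySem.Int.floordiv 0 2))
  simp only [] at h2
  rw [h2, Option.getD_some]

theorem solve_spec' (A B C X Y : Int) (h : 0 ≤ max X Y) :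
    solve A B C X Y = solve_alt A B C X Y := by
  set M := max X Y with hM
  set L := PySem.List.pyRange 1 (M * 2 + 1) 1 with hL
  set m := (L.map (fA A B C X Y)).foldl min (fA A B C X Y 0) with hm
  have hsolve : solve A B C X Y = m := solve_eq_fold A B C X Y h
  -- m is a lower bound of fA on [0, 2M]
  have hlow : ∀ ab : Int, 0 ≤ ab → ab ≤ M * 2 → m ≤ fA A B C X Y ab := by
    intro ab h0 h2
    rw [hm]
    rcases eq_or_lt_of_le h0 with h0' | h0'
    · rw [← h0']; exact (PySem.List.foldl_min_le _ _).1
    · exact (PySem.List.foldl_min_le _ _).2 _ (List.mem_map_of_mem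
        ((PySem.List.mem_pyRange_one).2 ⟨by omega, by omega⟩))
  -- m is attained by fA at some point of [0, 2M]
  have hatt : ∃ ab : Int, 0 ≤ ab ∧ ab ≤ M * 2 ∧ m = fA A B C X Y ab := by
    rcases PySem.List.foldl_min_mem (L.map (fA A B C X Y)) (fA A B C X Y 0) with hc | hc
    · exact ⟨0, le_refl 0, by omega, by rw [hm, hc]⟩
    · rcases List.mem_map.1 hc with ⟨ab, habL, hab⟩
      have := (PySem.List.mem_pyRange_one).1 habL
      exact ⟨ab, by omega, by omega, by rw [hm, ← hab]⟩
  -- breakpoint values are values of fA inside the range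
  have hgfe : ∀ k : Int, 0 ≤ k → k ≤ M → m ≤ gB A B C X Y k := by
    intro k h0 h1
    rw [← fA_even]; exact hlow (2 * k) (by omega) (by omega)
  have hgfo : ∀ k : Int, 0 ≤ k → k ≤ M - 1 → m ≤ C + gB A B C X Y k := by
    intro k h0 h1
    rw [← fA_odd]; exact hlow (2 * k + 1) (by omega) (by omega)
  rw [hsolve]
  have hpM : max X 0 ≤ M := by omega
  have hqM : max Y 0 ≤ M := by omega
  -- upper bound: solve_alt evaluates gB only inside [0, M] / [0, M-1]
  have hub : m ≤ solve_alt A B C X Y := by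
    simp only [solve_alt, ← hM]
    split_ifs with h1
    · refine le_min (le_min (le_min (le_min ?_ ?_) ?_) ?_)
        (by
          have h2 : m ≤ C + min (min (min (gB A B C X Y 0) (gB A B C X Y (min (max X 0) (M - 1)))) (gB A B C X Y (min (max Y 0) (M - 1)))) (gB A B C X Y (M - 1)) := by
            rcases min_cases (min (min (gB A B C X Y 0) (gB A B C X Y (min (max X 0) (M - 1)))) (gB A B C X Y (min (max Y 0) (M - 1)))) (gB A B C X Y (M - 1)) with ⟨hc, _⟩ | ⟨hc, _⟩
            · rw [hc]
              rcases min_cases (min (gB A B C X Y 0) (gB A B C X Y (min (max X 0) (M - 1)))) (gB A B C X Y (min (max Y 0) (M - 1))) with ⟨hc2, _⟩ | ⟨hc2, _⟩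
              · rw [hc2]
                rcases min_cases (gB A B C X Y 0) (gB A B C X Y (min (max X 0) (M - 1))) with ⟨hc3, _⟩ | ⟨hc3, _⟩
                · rw [hc3]; exact hgfo 0 le_rfl (by omega)
                · rw [hc3]; exact hgfo _ (by omega) (by omega)
              · rw [hc2]; exact hgfo _ (by omega) (by omega)
            · rw [hc]; exact hgfo (M - 1) (by omega) (by omega)
          exact h2)
      · exact hgfe 0 le_rfl h
      · exact hgfe _ (by omega) hpM
      · exact hgfe _ (by omega) hqM
      · exact hgfe M h le_rfl
    · exact le_min (le_min (le_min (hgfe 0 le_rfl h) (hgfe _ (by omega) hpM)) (hgfe _ (by omega) hqM)) (hgfe M h le_rfl)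
  -- lower bound: every fA value, hence m, dominates solve_alt
  have hlb : solve_alt A B C X Y ≤ m := by
    rcases hatt with ⟨ab, h0, h2, hab⟩
    rw [hab]
    rcases Int.even_or_odd ab with ⟨k, hk⟩ | ⟨k, hk⟩
    · -- ab = 2k
      rw [show ab = 2 * k by omega, fA_even]
      have hk0 : 0 ≤ k := by omega
      have hkM : k ≤ M := by omega
      have := g_lb A B C X Y M k hk0 hkM
      rw [min_eq_left hpM, min_eq_left hqM] at this
      simp only [solve_alt, ← hM]
      split_ifs with h1
      · exact le_trans (min_le_left _ _) this
      · exact this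
    · -- ab = 2k + 1
      rw [show ab = 2 * k + 1 by omega, fA_odd]
      have hk0 : 0 ≤ k := by omega
      have hkM : k ≤ M - 1 := by omega
      have hM1 : 1 ≤ M := by omega
      have := g_lb A B C X Y (M - 1) k hk0 hkM
      simp only [solve_alt, ← hM]
      rw [if_pos hM1]
      exact le_trans (min_le_right _ _) (by omega)
  omega

-- ===== VERDICT (by name: the statement is the Claim_ definition above) =====
theorem solve_spec : Claim_equal_solve := by
  intro A B C X Y _ hpre
  unfold Spec_solve
  exact solve_spec' A B C X Y hpre
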